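/-
  (TO BE MERGED INTO Gif/Spec/Common.lean as its §8 before the freeze: kept apart while Common.lean's lemmas are being proved.)

  §8  WHAT THE POSTCONDITIONS OF THE ALLOCATING AND FREEING FUNCTIONS SAY
      Heap.Grew H H'             `H'` is `H` after allocations (and frees of objects allocated in between): every object of `H` is
                                 an object of `H'`, UNCHANGED; every other object of `H'` lies at or above `H.next`
      Owns.grew, Owns.cons_grew  what is owned stays owned; a live object at or above `H.next` can be owned too
      Heap.releaseAll H ps       `free` of every pointer of the list, in order
      Back2 H rest frames R u v H' F'
                                 the common postcondition of a function that MAY allocate, free and move ownership: the heap's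
                                 invariant for A heap `H'` at the place of `H`, the state invariant for A forest `F'`, `rem` not
                                 increased. (`Back` is the case `H' = H`, `F' = F`)
      Forest.imgs F              the counted images (`[]` without an array)
      Forest.SameBut…            which components a function leaves alone
      Gap0 H w                   a window that meets no byte of any object of the heap (the heap-level half of `Gap`)
-/
import Gif.Spec.Common
namespace Gif.Spec
open X86 X86.User Asan ProgX.Base ProgX.Base.Spec

/-! ### 8. Allocating and freeing functions -/

/-- **`H'` is `H` after some allocations** (and `free`s of objects allocated in between): the region is the same, every object of
`H` is in `H'` with the same size, capacity and state, every other object of `H'` lies at or above `H.next`, and the bump pointer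
did not go back. -/
structure _root_.Asan.Heap.Grew (H H' : Heap) : Prop where
  region : SameRegion H H'
  old : ∀ x, x ∈ H.objs → x ∈ H'.objs
  new : ∀ x, x ∈ H'.objs → x ∈ H.objs ∨ H.next ≤ x.base
  used : H.used ≤ H'.used

theorem _root_.Asan.Heap.Grew.refl (H : Heap) : H.Grew H :=
  ⟨SameRegion.refl H, fun _ h => h, fun _ h => Or.inl h, Nat.le_refl _⟩

theorem _root_.Asan.Heap.Grew.trans {H H' H'' : Heap} (h1 : H.Grew H') (h2 : H'.Grew H'') : H.Grew H'' := by
  refine ⟨h1.region.trans h2.region, fun x hx => h2.old x (h1.old x hx), ?_, Nat.le_trans h1.used h2.used⟩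
  intro x hx
  rcases h2.new x hx with hin | hge
  · exact h1.new x hin
  · right
    have e1 := h1.region.1
    have e2 := h1.used
    rw [Heap.next_def] at hge ⊢
    omega

/-- An allocation. -/
theorem _root_.Asan.Heap.Grew.push (H : Heap) (n c : Nat) : H.Grew (H.push n c) := by
  refine ⟨SameRegion.push H n c, ?_, ?_, ?_⟩
  · intro x hx
    rw [Heap.push_objs]
    exact List.mem_cons_of_mem _ hx
  · intro x hx
    rw [Heap.push_objs] at hx
    rcases List.mem_cons.mp hx with rfl | hin
    · exact Or.inr (Nat.le_refl _)
    · exact Or.inl hin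
  · rw [Heap.push_used]
    omega

/-- What is owned stays owned. -/
theorem Owns.grew {H H' : Heap} {objs : List (Nat × Nat)} (h : Owns H objs) (hg : H.Grew H') : Owns H' objs := by
  refine ⟨?_, h.apart⟩
  intro o ho
  obtain ⟨c, hl⟩ := h.live o ho
  exact ⟨c, hg.old _ hl⟩

/-- **A live object at or above the old bump pointer can be owned too**: no object of the old heap has its base. -/
theorem Owns.cons_grew {H H' : Heap} {objs : List (Nat × Nat)} {mem : Mem} (h : Owns H objs) (hok : HeapOK H mem)
    (hg : H.Grew H') {p n : Nat} (hl : H'.Live p n) (hp : H.next ≤ p) : Owns H' ((p, n) :: objs) := by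
  refine (h.grew hg).cons hl ?_
  intro x hx e
  obtain ⟨cx, hlx⟩ := h.live x hx
  have := hok.next_above hlx
  simp only at this e
  omega

/-- **`free` of every pointer of the list**, in order. -/
def _root_.Asan.Heap.releaseAll (H : Heap) (ps : List Nat) : Heap := ps.foldl Heap.release H

theorem _root_.Asan.Heap.releaseAll_nil (H : Heap) : H.releaseAll [] = H := rfl

theorem _root_.Asan.Heap.releaseAll_cons (H : Heap) (p : Nat) (ps : List Nat) :
    H.releaseAll (p :: ps) = (H.release p).releaseAll ps := rfl

theorem SameRegion.releaseAll (H : Heap) (ps : List Nat) : SameRegion H (H.releaseAll ps) := by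
  induction ps generalizing H with
  | nil => exact SameRegion.refl H
  | cons p ps ih =>
    rw [Heap.releaseAll_cons]
    exact (SameRegion.release H p).trans (ih (H.release p))

/-- **Freeing the first objects of what is owned keeps the others.** -/
theorem Owns.releaseAll {H : Heap} {xs objs : List (Nat × Nat)} (h : Owns H (xs ++ objs)) :
    Owns (H.releaseAll (xs.map Prod.fst)) objs := by
  induction xs generalizing H with
  | nil => exact h
  | cons x xs ih =>
    simp only [List.map_cons, Heap.releaseAll_cons]
    apply ih
    have h' : Owns H ((x.1, x.2) :: (xs ++ objs)) := h
    exact h'.release_head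

/-- **THE COMMON POSTCONDITION of a function that may allocate, free and move ownership**: at the returned state `v` the heap's
invariant holds for the heap `H'` (at the place of the entry's heap, with the clean stack ending at the caller's stack pointer),
the state invariant for the forest `F'`, and the reader did not go back. -/
structure Back2 (H : Heap) (rest : List Obj) (frames : List (Nat × FrameLayout)) (R : Rd) (u v : State) (H' : Heap) (F' : Forest) :
    Prop where
  region : SameRegion H H'
  inv : HeapInv H' rest frames ((u.reg .rsp).toNat + 8) v.mem
  ok : GifOK H' F' R v.mem
  rem : rem R v.mem ≤ rem R u.mem

theorem Back.back2 {H : Heap} {rest : List Obj} {frames : List (Nat × FrameLayout)} {F : Forest} {R : Rd} {u v : State}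
    (h : Back H rest frames F R u v) : Back2 H rest frames R u v H F :=
  ⟨SameRegion.refl H, h.inv, h.ok, h.rem⟩

/-- The counted images of the forest (`[]` without an array). -/
def Forest.imgs (F : Forest) : List Img :=
  match F.saved with
  | none => []
  | some s => s.imgs

/-- `F'` is `F` but for `scm`. -/
def Forest.SameButScm (F F' : Forest) : Prop :=
  F'.gif = F.gif ∧ F'.pv = F.pv ∧ F'.icm = F.icm ∧ F'.saved = F.saved ∧ F'.pend = F.pend

/-- `F'` is `F` but for `icm`. -/
def Forest.SameButIcm (F F' : Forest) : Prop :=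
  F'.gif = F.gif ∧ F'.pv = F.pv ∧ F'.scm = F.scm ∧ F'.saved = F.saved ∧ F'.pend = F.pend

/-- `F'` is `F` but for `saved` (the array may have moved; what is said of the images is said separately). -/
def Forest.SameButSaved (F F' : Forest) : Prop :=
  F'.gif = F.gif ∧ F'.pv = F.pv ∧ F'.scm = F.scm ∧ F'.icm = F.icm ∧ F'.pend = F.pend

/-- `F'` is `F` but for `icm` and `saved` (DGifGetImageDesc). -/
def Forest.SameButIcmSaved (F F' : Forest) : Prop :=
  F'.gif = F.gif ∧ F'.pv = F.pv ∧ F'.scm = F.scm ∧ F'.pend = F.pend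

/-- `F'` is `F` but for `pend`. -/
def Forest.SameButPend (F F' : Forest) : Prop :=
  F'.gif = F.gif ∧ F'.pv = F.pv ∧ F'.scm = F.scm ∧ F'.icm = F.icm ∧ F'.saved = F.saved

/-- **A window that meets no byte of any object of the heap** (a header, a red zone, the control cell, the shadow): the heap-level
half of `Gap`, for the posts of functions that do not know the reader. -/
def Gap0 (H : Heap) (w : Span) : Prop :=
  ∀ x, x ∈ H.objs → w.hi ≤ x.base ∨ x.base + x.cap ≤ w.lo

/-- A window of the heap's region or of the shadow that meets no object is a gap. -/
theorem Gap.of_gap0 {H : Heap} {R : Rd} {w : Span} (h : Gap0 H w) (hw : 0x800000 ≤ w.lo)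
    (hcur : R.cur + 16 ≤ 0x800000) : Gap H R w := by
  refine ⟨h, ?_, ?_⟩
  · omega
  · omega

/-- The image's constants through two memories that agree on `[141300H, 14139AH)` (the stub has `EqOn`, not a footprint). -/
theorem Consts.eqOn {mem mem' : Mem} (h : Consts mem) (he : Mem.EqOn 0x141300 0x14139a mem mem') : Consts mem' := by
  obtain ⟨k1, k2, k3⟩ := h
  refine ⟨?_, ?_, ?_⟩
  · intro k hk12
    rw [he.rd (0x141380 + 2 * k) 2 (by omega) (by omega) (by omega)]
    exact k1 k hk12
  · rw [he.rd 0x141340 4 (by omega) (by omega) (by omega), he.rd 0x141344 4 (by omega) (by omega) (by omega),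
      he.rd 0x141348 4 (by omega) (by omega) (by omega), he.rd 0x14134c 4 (by omega) (by omega) (by omega)]
    exact k2
  · rw [he.rd 0x141300 4 (by omega) (by omega) (by omega), he.rd 0x141304 4 (by omega) (by omega) (by omega),
      he.rd 0x141308 4 (by omega) (by omega) (by omega), he.rd 0x14130c 4 (by omega) (by omega) (by omega)]
    exact k3

/-- The constants survive a footprint that stays off `[141300H, 14139AH)`. -/
theorem Consts.sameExcept {mem mem' : Mem} {ws : List Span} (h : Consts mem) (hs : Mem.SameExcept ws mem mem')
    (hw : ∀ w, w ∈ ws → w.hi ≤ 0x141300 ∨ 0x14139a ≤ w.lo) : Consts mem' := by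
  apply h.eqOn
  apply hs.eqOn
  intro w hin
  have := hw w hin
  omega

/-- The cursor's two fields through a footprint that misses the cursor. -/
theorem CursorOK.sameExcept {R : Rd} {mem mem' : Mem} {ws : List Span} (h : CursorOK R mem) (hs : Mem.SameExcept ws mem mem')
    (hc : R.cur + 16 < 2 ^ 64) (hw : ∀ w, w ∈ ws → w.hi ≤ R.cur ∨ R.cur + 16 ≤ w.lo) : CursorOK R mem' := by
  have he : Mem.EqOn R.cur (R.cur + 16) mem mem' := by
    apply hs.eqOn
    intro w hin
    have := hw w hin
    omega
  have c1 : mem_cursor.cur mem' R.cur = mem_cursor.cur mem R.cur := by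
    simp only [gfield]
    exact he.rd R.cur 8 (by omega) (by omega) (by omega)
  have c2 : mem_cursor.end mem' R.cur = mem_cursor.end mem R.cur := by
    simp only [gfield]
    exact he.rd (R.cur + 8) 8 (by omega) (by omega) (by omega)
  obtain ⟨k1, k2, k3⟩ := h
  refine ⟨?_, ?_, ?_⟩
  · rw [c1]
    exact k1
  · rw [c1, c2]
    exact k2
  · rw [c2]
    exact k3

/-- **An out-pointer to an `int` of a caller's protected frame, or NULL** (`*Error`, `*ErrorCode`): 4 bytes inside one live stack
object, not the cursor. -/
def ErrPtr (H : Heap) (rest : List Obj) (frames : List (Nat × FrameLayout)) (R : Rd) (p : Nat) : Prop :=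
  p = 0 ∨
  (LiveIn (H.liveObjs ++ rest) frames p 4 ∧ 0x700000 ≤ p ∧ p + 4 ≤ 0x800000 ∧ (p + 4 ≤ R.cur ∨ R.cur + 16 ≤ p))

end Gif.Spec
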